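-- pv_equiv track=rewrite | github.com/aymericfloyrac/EA-MAP--shazam | fingerprint.py | findTimePairs
-- ===== SOURCE A (Python) =====
-- def findTimePairs(hash_database,sample_hash,deltaTime,deltaFreq):
--     "Find the matching pairs between sample audio file and the songs in the database"
--
--     timePairs = []
--
--     for i in sample_hash:
--         for j in hash_database:
--             if(i[0] > (j[0]-deltaFreq) and i[0] < (j[0] + deltaFreq)):
--                 if(i[1] > (j[1]-deltaFreq) and i[1] < (j[1] + deltaFreq)):
--                     if(i[2] > (j[2]-deltaTime) and i[2] < (j[2] + deltaTime)):
--                         timePairs.append((j[3],i[3],j[4]))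
--                     else:
--                         continue
--                 else:
--                     continue
--             else:
--                 continue
--
--     return timePairs
-- ===== SOURCE B (Python) =====
-- def findTimePairs(hash_database, sample_hash, deltaTime, deltaFreq):
--     "Find the matching pairs between sample audio file and the songs in the database"
--     if not hash_database or not sample_hash or deltaFreq <= 0 or deltaTime <= 0:
--         return []
--     buckets = {}
--     for idx, j in enumerate(hash_database):
--         buckets.setdefault(j[0] // deltaFreq, []).append((idx, j))
--     out = []
--     for i in sample_hash:
--         k = i[0] // deltaFreq
--         cand = []
--         for kk in (k - 1, k, k + 1):
--             cand.extend(buckets.get(kk, []))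
--         matches = [p for p in cand
--                    if abs(i[0] - p[1][0]) < deltaFreq
--                    and abs(i[1] - p[1][1]) < deltaFreq
--                    and abs(i[2] - p[1][2]) < deltaTime]
--         matches.sort(key=lambda p: p[0])
--         out.extend((p[1][3], i[3], p[1][4]) for p in matches)
--     return out
-- ===== Notes on version B (the rewrite author's own statement) =====
-- stated objective: alternative
-- what changed: B buckets the database rows in a dict keyed by the quantized first frequency (j[0]//deltaFreq) and, for each sample row, probes only the three neighbouring buckets, filters the candidates and sorts them back into database order, instead of A's nested scan over every (sample, database) pair.
import Mathlib
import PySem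

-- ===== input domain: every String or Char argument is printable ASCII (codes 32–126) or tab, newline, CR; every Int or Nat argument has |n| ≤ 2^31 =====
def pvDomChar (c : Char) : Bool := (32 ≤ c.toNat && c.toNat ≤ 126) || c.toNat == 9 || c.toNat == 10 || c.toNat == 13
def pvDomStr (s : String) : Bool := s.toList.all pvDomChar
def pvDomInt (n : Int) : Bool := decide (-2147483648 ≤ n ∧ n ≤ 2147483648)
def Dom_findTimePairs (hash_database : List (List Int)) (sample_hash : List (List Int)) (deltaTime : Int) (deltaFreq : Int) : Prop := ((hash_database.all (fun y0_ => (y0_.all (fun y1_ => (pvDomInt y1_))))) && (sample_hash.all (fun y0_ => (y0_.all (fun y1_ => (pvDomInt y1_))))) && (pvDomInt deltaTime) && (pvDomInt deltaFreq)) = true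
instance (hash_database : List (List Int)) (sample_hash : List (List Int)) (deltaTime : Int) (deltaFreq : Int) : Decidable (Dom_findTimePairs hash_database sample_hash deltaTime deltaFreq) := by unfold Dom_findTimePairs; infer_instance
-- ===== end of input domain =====

-- B replaces A's all-pairs nested scan with a dictionary of database rows bucketed by
-- quantized first frequency (j[0] // deltaFreq); each sample row probes only the three
-- neighbouring buckets and sorts its candidates back into database order (alternative
-- algorithm; equality of the return value is what is proved below).

-- xs[k] for a constant in-range index (Pre_ guarantees the range)
def pvPG (l : List Int) (n : Int) : Int := PySem.List.pyGetD l n 0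

-- ===== PORT A =====
def findTimePairs (hash_database : List (List Int)) (sample_hash : List (List Int)) (deltaTime : Int) (deltaFreq : Int) : List (List Int) :=
  sample_hash.foldl (fun timePairs i =>
    hash_database.foldl (fun tp j =>
      if pvPG i 0 > pvPG j 0 - deltaFreq ∧ pvPG i 0 < pvPG j 0 + deltaFreq then
        if pvPG i 1 > pvPG j 1 - deltaFreq ∧ pvPG i 1 < pvPG j 1 + deltaFreq then
          if pvPG i 2 > pvPG j 2 - deltaTime ∧ pvPG i 2 < pvPG j 2 + deltaTime then
            tp ++ [[pvPG j 3, pvPG i 3, pvPG j 4]]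
          else tp
        else tp
      else tp) timePairs) []

-- ===== PORT B =====
-- the per-candidate test of Source B's comprehension
def pvMatch (deltaTime deltaFreq : Int) (i j : List Int) : Bool :=
  decide (|pvPG i 0 - pvPG j 0| < deltaFreq) &&
  decide (|pvPG i 1 - pvPG j 1| < deltaFreq) &&
  decide (|pvPG i 2 - pvPG j 2| < deltaTime)

-- the bucket dict of Source B: database rows grouped by quantized first frequency
def pvBuckets (hash_database : List (List Int)) (deltaFreq : Int) : PySem.Dict Int (List (Int × List Int)) :=
  (PySem.List.enumerate hash_database 0).foldl
    (fun d p => d.modify (PySem.Int.floordiv (pvPG p.2 0) deltaFreq) [] (fun l => l ++ [p]))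
    PySem.Dict.empty

def findTimePairs_alt (hash_database : List (List Int)) (sample_hash : List (List Int)) (deltaTime : Int) (deltaFreq : Int) : List (List Int) :=
  if hash_database = [] ∨ sample_hash = [] ∨ deltaFreq ≤ 0 ∨ deltaTime ≤ 0 then []
  else
    let buckets := pvBuckets hash_database deltaFreq
    sample_hash.foldl (fun out i =>
      let k := PySem.Int.floordiv (pvPG i 0) deltaFreq
      let cand := buckets.getD (k - 1) [] ++ buckets.getD k [] ++ buckets.getD (k + 1) []
      let ms := cand.filter (fun p => pvMatch deltaTime deltaFreq i p.2)
      let sm := PySem.List.sorted ms (fun p => p.1) false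
      out ++ sm.map (fun p => [pvPG p.2 3, pvPG i 3, pvPG p.2 4])) []

-- ===== PRECONDITION & SPEC =====
-- Pre_ admits exactly the inputs on which the Python A returns (raises no IndexError):
-- for every (sample, database) row pair, the row lengths support each index that A's
-- short-circuited comparison chain actually reaches.
def Pre_findTimePairs (hash_database : List (List Int)) (sample_hash : List (List Int)) (deltaTime : Int) (deltaFreq : Int) : Prop :=
  ∀ i ∈ sample_hash, ∀ j ∈ hash_database,
    1 ≤ i.length ∧ 1 ≤ j.length ∧
    (|pvPG i 0 - pvPG j 0| < deltaFreq →
      2 ≤ i.length ∧ 2 ≤ j.length ∧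
      (|pvPG i 1 - pvPG j 1| < deltaFreq →
        3 ≤ i.length ∧ 3 ≤ j.length ∧
        (|pvPG i 2 - pvPG j 2| < deltaTime → 4 ≤ i.length ∧ 5 ≤ j.length)))
instance (hash_database : List (List Int)) (sample_hash : List (List Int)) (deltaTime : Int) (deltaFreq : Int) : Decidable (Pre_findTimePairs hash_database sample_hash deltaTime deltaFreq) := by unfold Pre_findTimePairs; infer_instance

def pvWitness_findTimePairs : List (List Int) × List (List Int) × Int × Int :=
  ([[0, 0, 0, 7, 9]], [[0, 0, 0, 5]], 2, 2)

def Spec_findTimePairs (hash_database : List (List Int)) (sample_hash : List (List Int)) (deltaTime : Int) (deltaFreq : Int) (out : List (List Int)) : Prop := out = findTimePairs_alt hash_database sample_hash deltaTime deltaFreq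
instance (hash_database : List (List Int)) (sample_hash : List (List Int)) (deltaTime : Int) (deltaFreq : Int) (out : List (List Int)) : Decidable (Spec_findTimePairs hash_database sample_hash deltaTime deltaFreq out) := by unfold Spec_findTimePairs; infer_instance

-- ===== CLAIM (what is proved, stated in full; the proofs are below) =====
def Claim_equal_findTimePairs : Prop := ∀ (hash_database : List (List Int)) (sample_hash : List (List Int)) (deltaTime : Int) (deltaFreq : Int), Dom_findTimePairs hash_database sample_hash deltaTime deltaFreq → Pre_findTimePairs hash_database sample_hash deltaTime deltaFreq → Spec_findTimePairs hash_database sample_hash deltaTime deltaFreq (findTimePairs hash_database sample_hash deltaTime deltaFreq)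

-- ===== LEMMAS AND PROOFS =====

-- output row built for sample row i and database row j
def pvOut (i j : List Int) : List Int := [pvPG j 3, pvPG i 3, pvPG j 4]

-- A's inner loop is a filter-map over the database
lemma A_inner (db : List (List Int)) (dT dF : Int) (i : List Int) (acc : List (List Int)) :
    db.foldl (fun tp j =>
      if pvPG i 0 > pvPG j 0 - dF ∧ pvPG i 0 < pvPG j 0 + dF then
        if pvPG i 1 > pvPG j 1 - dF ∧ pvPG i 1 < pvPG j 1 + dF then
          if pvPG i 2 > pvPG j 2 - dT ∧ pvPG i 2 < pvPG j 2 + dT then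
            tp ++ [pvOut i j]
          else tp
        else tp
      else tp) acc
    = acc ++ (db.filter (fun j => pvMatch dT dF i j)).map (pvOut i) := by
  induction db generalizing acc with
  | nil => simp
  | cons j t ih =>
    have hb : (if pvPG i 0 > pvPG j 0 - dF ∧ pvPG i 0 < pvPG j 0 + dF then
        if pvPG i 1 > pvPG j 1 - dF ∧ pvPG i 1 < pvPG j 1 + dF then
          if pvPG i 2 > pvPG j 2 - dT ∧ pvPG i 2 < pvPG j 2 + dT then
            acc ++ [pvOut i j]
          else acc
        else acc
      else acc) = if pvMatch dT dF i j then acc ++ [pvOut i j] else acc := by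
      simp only [pvMatch, Bool.and_eq_true, decide_eq_true_eq, abs_sub_lt_iff]
      split_ifs <;> first | rfl | omega
    simp only [List.foldl_cons, List.filter_cons, hb]
    by_cases h : pvMatch dT dF i j = true
    · simp [h, ih]
    · simp [h, ih]

lemma A_flat (db s : List (List Int)) (dT dF : Int) :
    findTimePairs db s dT dF
      = s.flatMap (fun i => (db.filter (fun j => pvMatch dT dF i j)).map (pvOut i)) := by
  unfold findTimePairs
  have hfun2 : (fun (timePairs : List (List Int)) (i : List Int) =>
      db.foldl (fun tp j =>
        if pvPG i 0 > pvPG j 0 - dF ∧ pvPG i 0 < pvPG j 0 + dF then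
          if pvPG i 1 > pvPG j 1 - dF ∧ pvPG i 1 < pvPG j 1 + dF then
            if pvPG i 2 > pvPG j 2 - dT ∧ pvPG i 2 < pvPG j 2 + dT then
              tp ++ [[pvPG j 3, pvPG i 3, pvPG j 4]]
            else tp
          else tp
        else tp) timePairs)
      = fun timePairs i => timePairs ++ (db.filter (fun j => pvMatch dT dF i j)).map (pvOut i) := by
    funext acc i
    simpa [pvOut] using A_inner db dT dF i acc
  rw [hfun2, PySem.List.foldl_append_eq_flatMap]
  simp

-- bucket built by the fold = ordered filter of the enumerated database by key
lemma bucket_char (keyf : Int × List Int → Int) :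
    ∀ (l : List (Int × List Int)) (d : PySem.Dict Int (List (Int × List Int))) (k : Int),
      (l.foldl (fun d p => d.modify (keyf p) [] (fun l => l ++ [p])) d).getD k []
        = d.getD k [] ++ l.filter (fun p => decide (keyf p = k)) := by
  intro l
  induction l with
  | nil => intro d k; simp
  | cons p t ih =>
    intro d k
    simp only [List.foldl_cons, List.filter_cons, ih]
    by_cases h : keyf p = k
    · simp [h]
    · have : ¬ (k = keyf p) := fun hh => h hh.symm
      simp [h, this, PySem.Dict.getD_modify]

-- a q-filter over three mutually exclusive, jointly exhaustive buckets is a permutation of the plain q-filter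
lemma probe_perm {α : Type} (q ka kb kc : α → Bool)
    (hex : ∀ x, q x = true →
      (ka x = true ∧ kb x = false ∧ kc x = false) ∨
      (ka x = false ∧ kb x = true ∧ kc x = false) ∨
      (ka x = false ∧ kb x = false ∧ kc x = true)) :
    ∀ E : List α, (E.filter q).Perm
      ((E.filter ka ++ E.filter kb ++ E.filter kc).filter q) := by
  intro E
  induction E with
  | nil => simp
  | cons x E ih =>
    simp only [List.filter_append] at ih ⊢
    by_cases hq : q x = true
    · rcases hex x hq with ⟨h1, h2, h3⟩ | ⟨h1, h2, h3⟩ | ⟨h1, h2, h3⟩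
      · simp only [List.filter_cons, h1, h2, h3, hq, if_true,
          Bool.false_eq_true, if_false, List.cons_append]
        exact ih.cons x
      · simp only [List.filter_cons, h1, h2, h3, hq, if_true,
          Bool.false_eq_true, if_false]
        rw [List.append_assoc, List.cons_append]
        exact (List.Perm.cons x (by simpa using ih)).trans List.perm_middle.symm
      · simp only [List.filter_cons, h1, h2, h3, hq, if_true,
          Bool.false_eq_true, if_false]
        exact (List.Perm.cons x ih).trans List.perm_middle.symm
    · have hq' : q x = false := by simpa using hq
      have drop : ∀ (p : α → Bool),
          List.filter q (if p x = true then x :: List.filter p E else List.filter p E)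
            = List.filter q (List.filter p E) := by
        intro p
        split_ifs with h
        · simp [hq']
        · rfl
      simp only [List.filter_cons, hq', Bool.false_eq_true, if_false, drop]
      exact ih

-- a match forces the database key into the three probed buckets
lemma key_near (dT dF : Int) (hdF : 0 < dF) (i j : List Int) (hm : pvMatch dT dF i j = true) :
    PySem.Int.floordiv (pvPG j 0) dF = PySem.Int.floordiv (pvPG i 0) dF - 1 ∨
    PySem.Int.floordiv (pvPG j 0) dF = PySem.Int.floordiv (pvPG i 0) dF ∨
    PySem.Int.floordiv (pvPG j 0) dF = PySem.Int.floordiv (pvPG i 0) dF + 1 := by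
  have h0 : |pvPG i 0 - pvPG j 0| < dF := by
    simp only [pvMatch, Bool.and_eq_true, decide_eq_true_eq] at hm; exact hm.1.1
  rw [abs_sub_lt_iff] at h0
  simp only [PySem.Int.floordiv_eq_ediv_of_pos hdF]
  set a := pvPG i 0
  set bb := pvPG j 0
  have hne : dF ≠ 0 := by omega
  have hlo : (a - dF) / dF ≤ bb / dF := Int.ediv_le_ediv hdF (by omega)
  have hhi : bb / dF ≤ (a + dF) / dF := Int.ediv_le_ediv hdF (by omega)
  have e1 : (a - dF) / dF = a / dF - 1 := by
    have := Int.add_mul_ediv_right a (-1) hne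
    simpa [sub_eq_add_neg, neg_mul, one_mul] using this
  have e2 : (a + dF) / dF = a / dF + 1 := by
    have := Int.add_mul_ediv_right a 1 hne
    simpa using this
  omega

-- filter-map through enumerate forgets the indices
lemma enum_filter_map (m : List Int → Bool) (f : List Int → List Int) :
    ∀ (db : List (List Int)) (s0 : Int),
      ((PySem.List.enumerate db s0).filter (fun p => m p.2)).map (fun p => f p.2)
        = (db.filter m).map f := by
  intro db
  induction db with
  | nil => intro s0; simp [PySem.List.enumerate_nil]
  | cons j t ih =>
    intro s0
    simp only [PySem.List.enumerate_cons, List.filter_cons]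
    by_cases h : m j = true
    · simp [h, ih]
    · simp [h, ih]

-- per-sample-row: B's probe + sort equals the database-order filter
set_option maxHeartbeats 1000000 in
lemma B_per_row (db : List (List Int)) (dT dF : Int) (hdF : 0 < dF) (i : List Int) :
    (PySem.List.sorted
      (((pvBuckets db dF).getD (PySem.Int.floordiv (pvPG i 0) dF - 1) []
        ++ (pvBuckets db dF).getD (PySem.Int.floordiv (pvPG i 0) dF) []
        ++ (pvBuckets db dF).getD (PySem.Int.floordiv (pvPG i 0) dF + 1) []).filter
        (fun p => pvMatch dT dF i p.2))
      (fun p => p.1) false).map (fun p => [pvPG p.2 3, pvPG i 3, pvPG p.2 4])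
    = (db.filter (fun j => pvMatch dT dF i j)).map (pvOut i) := by
  have hb : ∀ k', (pvBuckets db dF).getD k' []
      = (PySem.List.enumerate db 0).filter
          (fun p => decide (PySem.Int.floordiv (pvPG p.2 0) dF = k')) := by
    intro k'
    simpa using bucket_char (fun p => PySem.Int.floordiv (pvPG p.2 0) dF)
      (PySem.List.enumerate db 0) PySem.Dict.empty k'
  have hperm : ((PySem.List.enumerate db 0).filter (fun p => pvMatch dT dF i p.2)).Perm
      (((pvBuckets db dF).getD (PySem.Int.floordiv (pvPG i 0) dF - 1) []
        ++ (pvBuckets db dF).getD (PySem.Int.floordiv (pvPG i 0) dF) []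
        ++ (pvBuckets db dF).getD (PySem.Int.floordiv (pvPG i 0) dF + 1) []).filter
        (fun p => pvMatch dT dF i p.2)) := by
    rw [hb, hb, hb]
    have hex : ∀ x : Int × List Int, pvMatch dT dF i x.2 = true →
        (decide (PySem.Int.floordiv (pvPG x.2 0) dF = PySem.Int.floordiv (pvPG i 0) dF - 1) = true ∧
          decide (PySem.Int.floordiv (pvPG x.2 0) dF = PySem.Int.floordiv (pvPG i 0) dF) = false ∧
          decide (PySem.Int.floordiv (pvPG x.2 0) dF = PySem.Int.floordiv (pvPG i 0) dF + 1) = false) ∨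
        (decide (PySem.Int.floordiv (pvPG x.2 0) dF = PySem.Int.floordiv (pvPG i 0) dF - 1) = false ∧
          decide (PySem.Int.floordiv (pvPG x.2 0) dF = PySem.Int.floordiv (pvPG i 0) dF) = true ∧
          decide (PySem.Int.floordiv (pvPG x.2 0) dF = PySem.Int.floordiv (pvPG i 0) dF + 1) = false) ∨
        (decide (PySem.Int.floordiv (pvPG x.2 0) dF = PySem.Int.floordiv (pvPG i 0) dF - 1) = false ∧
          decide (PySem.Int.floordiv (pvPG x.2 0) dF = PySem.Int.floordiv (pvPG i 0) dF) = false ∧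
          decide (PySem.Int.floordiv (pvPG x.2 0) dF = PySem.Int.floordiv (pvPG i 0) dF + 1) = true) := by
      intro x hx
      rcases key_near dT dF hdF i x.2 hx with hk | hk | hk
      · exact Or.inl ⟨by simp [hk],
          decide_eq_false (by rw [hk]; exact (sub_one_lt _).ne),
          decide_eq_false (by rw [hk]; exact ((sub_one_lt _).trans (lt_add_one _)).ne)⟩
      · exact Or.inr (Or.inl ⟨decide_eq_false (by rw [hk]; exact ((sub_one_lt _).ne).symm),
          by simp [hk],
          decide_eq_false (by rw [hk]; exact (lt_add_one _).ne)⟩)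
      · exact Or.inr (Or.inr ⟨decide_eq_false (by rw [hk]; exact (((sub_one_lt _).trans (lt_add_one _)).ne).symm),
          decide_eq_false (by rw [hk]; exact ((lt_add_one _).ne).symm),
          by simp [hk]⟩)
    exact probe_perm _ _ _ _ hex (PySem.List.enumerate db 0)
  have hpw : ((PySem.List.enumerate db 0).filter (fun p => pvMatch dT dF i p.2)).Pairwise
      (fun p q => p.1 < q.1) :=
    (PySem.List.pairwise_lt_enumerate db 0).filter _
  have hs : PySem.List.sorted
      (((pvBuckets db dF).getD (PySem.Int.floordiv (pvPG i 0) dF - 1) []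
        ++ (pvBuckets db dF).getD (PySem.Int.floordiv (pvPG i 0) dF) []
        ++ (pvBuckets db dF).getD (PySem.Int.floordiv (pvPG i 0) dF + 1) []).filter
        (fun p => pvMatch dT dF i p.2))
      (fun p => p.1) false
      = (PySem.List.enumerate db 0).filter (fun p => pvMatch dT dF i p.2) :=
    PySem.List.sorted_eq_of_perm_of_pairwise_lt _ _ (fun p => p.1) hperm hpw
  rw [hs]
  simpa [pvOut] using enum_filter_map (fun j => pvMatch dT dF i j) (pvOut i) db 0

lemma B_flat (db s : List (List Int)) (dT dF : Int) (hdb : db ≠ []) (hs : s ≠ [])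
    (hdF : 0 < dF) (hdT : 0 < dT) :
    findTimePairs_alt db s dT dF
      = s.flatMap (fun i => (db.filter (fun j => pvMatch dT dF i j)).map (pvOut i)) := by
  unfold findTimePairs_alt
  rw [if_neg (by push Not; exact ⟨hdb, hs, by omega, by omega⟩)]
  rw [PySem.List.foldl_append_eq_flatMap]
  simp only [List.nil_append]
  congr 1
  funext i
  exact B_per_row db dT dF hdF i

lemma match_false_of_nonpos (dT dF : Int) (h : dF ≤ 0 ∨ dT ≤ 0) (i j : List Int) :
    pvMatch dT dF i j = false := by
  simp only [pvMatch, Bool.and_eq_false_iff]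
  rcases h with h | h
  · left; left
    rw [decide_eq_false_iff_not]
    have := abs_nonneg (pvPG i 0 - pvPG j 0)
    omega
  · right
    rw [decide_eq_false_iff_not]
    have := abs_nonneg (pvPG i 2 - pvPG j 2)
    omega

-- ===== VERDICT (by name: the statement is the Claim_ definition above) =====
theorem findTimePairs_spec : Claim_equal_findTimePairs := by
  intro db s dT dF _ _
  unfold Spec_findTimePairs
  rcases eq_or_ne db [] with hdb | hdb
  · subst hdb
    rw [A_flat]
    unfold findTimePairs_alt
    simp
  rcases eq_or_ne s [] with hs | hs
  · subst hs
    rw [A_flat]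
    unfold findTimePairs_alt
    simp
  by_cases hpos : 0 < dF ∧ 0 < dT
  · rw [A_flat, B_flat db s dT dF hdb hs hpos.1 hpos.2]
  · have h : dF ≤ 0 ∨ dT ≤ 0 := by omega
    rw [A_flat]
    unfold findTimePairs_alt
    rw [if_pos (by omega)]
    have hnil : ∀ i : List Int, db.filter (fun j => pvMatch dT dF i j) = [] := by
      intro i
      apply List.filter_eq_nil_iff.mpr
      intro j _
      simp [match_false_of_nonpos dT dF h]
    simp [hnil]
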